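-- pv_equiv track=rewrite | github.com/SystemThinking/kmea | core/scripts/tools/helpers/template_engine.py | inject_front_matter_block
-- ===== SOURCE A (Python) =====
-- def has_front_matter(content: str) -> bool:
--     """Zistí, či text začína YAML Front Matter blokom (`---` na prvom riadku).
--
--     Nehodnotí korektnosť YAML, len kontroluje prvý riadok.
--     """
--
--     stripped = content.lstrip()
--     return stripped.startswith("---\n") or stripped.startswith("---\r\n")
--
-- def inject_front_matter_block(content: str, fm_block: str) -> str:
--     """Doplní alebo nahradí Front Matter blok na začiatku súboru.
--
--     Očakáva, že `fm_block` už obsahuje ohraničenie `---` hore aj dole,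
--     napríklad:
--
--     ```yaml
--     ---
--     id: K000123
--     title: "K000123 – Môj prvý KNIFE"
--     ...
--     ---
--     ```
--
--     Pravidlá:
--     - ak súbor už má FM na začiatku, nahradí sa celý pôvodný blok,
--     - ak nemá, FM sa vloží úplne na začiatok.
--     """
--
--     fm_block = fm_block.strip() + "\n"  # istota jedného koncového riadku
--
--     if not content:
--         return fm_block + "\n"
--
--     text = content
--
--     if has_front_matter(text):
--         # Nájsť prvé dva výskyty riadku s `---` (začiatok a koniec FM)
--         lines = text.splitlines(keepends=True)
--         first_sep_index = None
--         second_sep_index = None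
--
--         for i, line in enumerate(lines):
--             if line.strip() == "---":
--                 if first_sep_index is None:
--                     first_sep_index = i
--                 else:
--                     second_sep_index = i
--                     break
--
--         if first_sep_index is not None and second_sep_index is not None:
--             before = "".join(lines[:first_sep_index])
--             after = "".join(lines[second_sep_index + 1 :])
--             # FM blok dáme hneď na začiatok (ignorujeme čokoľvek pred ním)
--             return fm_block + "\n" + after.lstrip("\r\n")
--
--     # Ak sme tu, pôvodný FM blok sme nenašli – pridáme nový na začiatok
--     return fm_block + "\n" + text.lstrip("\r\n")
-- ===== SOURCE B (Python) =====
-- def has_front_matter(content: str) -> bool: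
--     stripped = content.lstrip()
--     return stripped.startswith("---\n") or stripped.startswith("---\r\n")
--
--
-- def _offset_after_second_sep(text):
--     """Single forward character scan (no line list): a small automaton recognises
--     lines that strip to exactly '---' and returns the character offset just past
--     the second such line, or None if there are fewer than two."""
--     seps = 0
--     state = 0  # 0 leading ws, 1/2/3 dashes seen, 4 ws after '---', 5 dead
--     i = 0
--     n = len(text)
--     while i < n:
--         c = text[i]
--         if c == "\n" or c == "\r":
--             if state == 3 or state == 4:
--                 seps += 1
--             if c == "\r" and i + 1 < n and text[i + 1] == "\n":
--                 i += 2
--             else: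
--                 i += 1
--             if seps == 2:
--                 return i
--             state = 0
--         else:
--             if c == "-":
--                 state = state + 1 if state <= 2 else 5
--             elif c in " \t\v\f":
--                 if state == 3:
--                     state = 4
--                 elif state == 1 or state == 2:
--                     state = 5
--             else:
--                 state = 5
--             i += 1
--     if (state == 3 or state == 4) and seps == 1:
--         return n
--     return None
--
--
-- def inject_front_matter_block(content: str, fm_block: str) -> str:
--     fm = fm_block.strip() + "\n"
--     if not content:
--         return fm + "\n"
--     if has_front_matter(content):
--         off = _offset_after_second_sep(content)
--         if off is not None:
--             return fm + "\n" + content[off:].lstrip("\r\n")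
--     return fm + "\n" + content.lstrip("\r\n")
-- ===== Notes on version B (the rewrite author's own statement) =====
-- stated objective: alternative
-- what changed: A splits the text into a kept-ends line list and scans it with enumerate tracking two separator indices, then re-joins slices; B never builds a line list: a single forward character scan with a 6-state automaton recognises lines that strip to '---' and returns the offset just past the second one, and the tail is one slice of the original string.
import Mathlib
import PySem

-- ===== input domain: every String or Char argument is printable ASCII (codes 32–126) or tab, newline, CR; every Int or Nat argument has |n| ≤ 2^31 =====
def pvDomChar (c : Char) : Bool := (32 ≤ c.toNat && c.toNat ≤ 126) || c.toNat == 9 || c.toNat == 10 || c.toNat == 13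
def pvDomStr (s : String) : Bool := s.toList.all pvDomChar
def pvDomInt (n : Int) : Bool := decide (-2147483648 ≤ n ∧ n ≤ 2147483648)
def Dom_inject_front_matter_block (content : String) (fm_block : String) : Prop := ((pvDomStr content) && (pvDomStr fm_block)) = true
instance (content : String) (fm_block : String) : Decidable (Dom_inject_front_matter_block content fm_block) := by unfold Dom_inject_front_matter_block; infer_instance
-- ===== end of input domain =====

-- B replaces A's build-a-line-list + two-index search with a single forward character
-- scan: a small automaton recognises separator lines and yields the char offset past
-- the second one, so no line list is ever built (objective: alternative).

-- ===== PORT A =====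
-- shared module helper: has_front_matter (used verbatim by both Pythons)
def has_front_matter (content : String) : Bool :=
  let stripped := PySem.Str.lstrip content
  PySem.Str.startswith stripped "---\n" || PySem.Str.startswith stripped "---\r\n"

-- hand port of str.splitlines(keepends=True); exact on the Dom charset
-- (the only line breaks in Dom are '\n', '\r' and '\r\n', as in CPython).
def splitKeep : List Char → List Char → List String
  | [], acc => if acc = [] then [] else [String.ofList acc.reverse]
  | '\n' :: rest, acc => String.ofList (acc.reverse ++ ['\n']) :: splitKeep rest []
  | '\r' :: '\n' :: rest, acc => String.ofList (acc.reverse ++ ['\r', '\n']) :: splitKeep rest []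
  | '\r' :: rest, acc => String.ofList (acc.reverse ++ ['\r']) :: splitKeep rest []
  | c :: rest, acc => splitKeep rest (c :: acc)

-- hand port of s.lstrip("\r\n"): drop leading chars from the set {'\r','\n'}; exact.
def lstripNL (s : String) : String :=
  String.ofList (s.toList.dropWhile (fun c => c == '\n' || c == '\r'))

-- A's for-loop over enumerate(lines) with first/second index state and break
def findSeps : List String → Nat → Option Nat → Option Nat × Option Nat
  | [], _, first? => (first?, none)
  | l :: rest, i, first? =>
    if PySem.Str.strip l = "---" then
      match first? with
      | none => findSeps rest (i + 1) (some i)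
      | some f => (some f, some i)   -- break
    else findSeps rest (i + 1) first?

def inject_front_matter_block (content : String) (fm_block : String) : String :=
  let fm := PySem.Str.strip fm_block ++ "\n"
  if content = "" then fm ++ "\n"
  else
    let text := content
    if has_front_matter text then
      let lines := splitKeep text.toList []
      match findSeps lines 0 none with
      | (some _, some s) =>
          let after := PySem.Str.join "" (lines.drop (s + 1))
          fm ++ "\n" ++ lstripNL after
      | _ => fm ++ "\n" ++ lstripNL text
    else fm ++ "\n" ++ lstripNL text

-- ===== PORT B =====
-- B's per-character automaton step: state 0 = leading ws, 1/2/3 = dashes seen,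
-- 4 = ws after '---', 5 = dead ('c in " \t\v\f"' ported as the four char tests)
def dfaStep (st : Nat) (c : Char) : Nat :=
  if c = '-' then (if st ≤ 2 then st + 1 else 5)
  else if c = ' ' ∨ c = '\t' ∨ c = '\x0b' ∨ c = '\x0c' then
    (if st = 3 then 4 else if st = 1 ∨ st = 2 then 5 else st)
  else 5

-- B's while-loop over the characters of text (index i becomes structural recursion;
-- pos tracks i); returns the offset just past the second separator line, else none.
def scanB : List Char → Nat → Nat → Nat → Option Nat
  | [], st, seps, pos =>
    if (st = 3 ∨ st = 4) ∧ seps = 1 then some pos else none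
  | '\r' :: '\n' :: rest, st, seps, pos =>
    let s' := if st = 3 ∨ st = 4 then seps + 1 else seps
    if s' = 2 then some (pos + 2) else scanB rest 0 s' (pos + 2)
  | '\r' :: rest, st, seps, pos =>
    let s' := if st = 3 ∨ st = 4 then seps + 1 else seps
    if s' = 2 then some (pos + 1) else scanB rest 0 s' (pos + 1)
  | '\n' :: rest, st, seps, pos =>
    let s' := if st = 3 ∨ st = 4 then seps + 1 else seps
    if s' = 2 then some (pos + 1) else scanB rest 0 s' (pos + 1)
  | c :: rest, st, seps, pos => scanB rest (dfaStep st c) seps (pos + 1)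

def inject_front_matter_block_alt (content : String) (fm_block : String) : String :=
  let fm := PySem.Str.strip fm_block ++ "\n"
  if content = "" then fm ++ "\n"
  else if has_front_matter content then
    match scanB content.toList 0 0 0 with
    | some off => fm ++ "\n" ++ lstripNL (String.ofList (content.toList.drop off))  -- content[off:]
    | none => fm ++ "\n" ++ lstripNL content
  else fm ++ "\n" ++ lstripNL content

-- ===== PRECONDITION & SPEC =====
def Spec_inject_front_matter_block (content : String) (fm_block : String) (out : String) : Prop := out = inject_front_matter_block_alt content fm_block
instance (content : String) (fm_block : String) (out : String) : Decidable (Spec_inject_front_matter_block content fm_block out) := by unfold Spec_inject_front_matter_block; infer_instance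

-- ===== CLAIM (what is proved, stated in full; the proofs are below) =====
def Claim_equal_inject_front_matter_block : Prop := ∀ (content : String) (fm_block : String), Dom_inject_front_matter_block content fm_block → Spec_inject_front_matter_block content fm_block (inject_front_matter_block content fm_block)

-- ===== LEMMAS AND PROOFS =====

-- char classes used by the proofs
def wsB (c : Char) : Bool := c = ' ' || c = '\t' || c = '\x0b' || c = '\x0c'
def nlB (c : Char) : Bool := c = '\n' || c = '\r'

def joinL (ls : List String) : List Char := (ls.map String.toList).flatten

-- A-side characterisation: index search as first-separator tail (afterSep) applied twice
def sepIdx (l : List String) : Option Nat :=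
  List.findIdx? (fun s => decide (PySem.Str.strip s = "---")) l

def afterSep : List String → Option (List String)
  | [] => none
  | l :: rest => if PySem.Str.strip l = "---" then some rest else afterSep rest

theorem sepIdx_cons_neg (a : String) (rest : List String) (hp : ¬ PySem.Str.strip a = "---") :
    sepIdx (a :: rest) = (sepIdx rest).map (· + 1) := by
  simp [sepIdx, List.findIdx?_cons, hp]

theorem findSeps_some (l : List String) (j f : Nat) :
    findSeps l j (some f) = (some f, (sepIdx l).map (fun k => j + k)) := by
  induction l generalizing j with
  | nil => simp [findSeps, sepIdx]
  | cons a rest ih =>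
    by_cases hp : PySem.Str.strip a = "---"
    · simp [findSeps, sepIdx, List.findIdx?_cons, hp]
    · have e1 : findSeps (a :: rest) j (some f) = findSeps rest (j + 1) (some f) := by
        simp [findSeps, hp]
      rw [e1, ih, sepIdx_cons_neg a rest hp]
      cases sepIdx rest <;> simp <;> omega

theorem findSeps_none (l : List String) (i : Nat) :
    findSeps l i none =
      match sepIdx l with
      | none => (none, none)
      | some k => (some (i + k), (sepIdx (l.drop (k + 1))).map (fun k2 => i + k + 1 + k2)) := by
  induction l generalizing i with
  | nil => simp [findSeps, sepIdx]
  | cons a rest ih =>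
    by_cases hp : PySem.Str.strip a = "---"
    · simp only [findSeps, if_pos hp, findSeps_some]
      simp [sepIdx, List.findIdx?_cons, hp]
    · have e1 : findSeps (a :: rest) i none = findSeps rest (i + 1) none := by
        simp [findSeps, hp]
      rw [e1, ih, sepIdx_cons_neg a rest hp]
      rcases h : sepIdx rest with _ | k
      · simp
      · simp only [Option.map_some, List.drop_succ_cons]
        rcases h2 : sepIdx (rest.drop (k + 1)) with _ | k2 <;> simp <;> omega

theorem afterSep_eq (l : List String) :
    afterSep l = (sepIdx l).map (fun k => l.drop (k + 1)) := by
  induction l with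
  | nil => simp [afterSep, sepIdx]
  | cons a rest ih =>
    by_cases hp : PySem.Str.strip a = "---"
    · simp [afterSep, hp, sepIdx, List.findIdx?_cons]
    · rw [show afterSep (a :: rest) = afterSep rest from by simp [afterSep, hp],
          ih, sepIdx_cons_neg a rest hp]
      cases sepIdx rest <;> simp

-- ===== B-side machinery =====

theorem splitKeep_cons_other (c : Char) (h1 : c ≠ '\n') (h2 : c ≠ '\r')
    (rest acc : List Char) : splitKeep (c :: rest) acc = splitKeep rest (c :: acc) := by
  rw [splitKeep.eq_def]
  split <;> simp_all

theorem scanB_cons_other (c : Char) (h1 : c ≠ '\n') (h2 : c ≠ '\r')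
    (rest : List Char) (st seps pos : Nat) :
    scanB (c :: rest) st seps pos = scanB rest (dfaStep st c) seps (pos + 1) := by
  rw [scanB.eq_def]
  split <;> simp_all

theorem splitKeep_cr (rest : List Char) (h : ∀ r, rest ≠ '\n' :: r) (acc : List Char) :
    splitKeep ('\r' :: rest) acc = String.ofList (acc.reverse ++ ['\r']) :: splitKeep rest [] := by
  match rest, h with
  | [], _ => simp [splitKeep]
  | c' :: r, h =>
    have hc' : c' ≠ '\n' := fun he => h r (by simp [he])
    rw [splitKeep.eq_def]
    split <;> (try simp_all) <;>
      (exfalso; rename_i hq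
       first
        | exact absurd hq.1 (by assumption)
        | exact absurd hq.1.symm (by assumption))

theorem scanB_cr (rest : List Char) (h : ∀ r, rest ≠ '\n' :: r) (st seps pos : Nat) :
    scanB ('\r' :: rest) st seps pos =
      (if (if st = 3 ∨ st = 4 then seps + 1 else seps) = 2 then some (pos + 1)
       else scanB rest 0 (if st = 3 ∨ st = 4 then seps + 1 else seps) (pos + 1)) := by
  match rest, h with
  | [], _ => simp [scanB]
  | c' :: r, h =>
    have hc' : c' ≠ '\n' := fun he => h r (by simp [he])
    rw [scanB.eq_def]
    split <;> (try simp_all) <;>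
      (exfalso; rename_i hq
       first
        | exact absurd hq.1 (by assumption)
        | exact absurd hq.1.symm (by assumption))

theorem splitKeep_pre (p : List Char) (hp : ∀ c ∈ p, nlB c = false) (cs acc : List Char) :
    splitKeep (p ++ cs) acc = splitKeep cs (p.reverse ++ acc) := by
  induction p generalizing acc with
  | nil => simp
  | cons c p' ih =>
    have hc := hp c (by simp)
    simp only [nlB, Bool.or_eq_false_iff, decide_eq_false_iff_not] at hc
    rw [List.cons_append, splitKeep_cons_other c hc.1 hc.2, ih (fun x hx => hp x (by simp [hx]))]
    simp

theorem scanB_pre (p : List Char) (hp : ∀ c ∈ p, nlB c = false) (cs : List Char)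
    (st seps pos : Nat) :
    scanB (p ++ cs) st seps pos = scanB cs (List.foldl dfaStep st p) seps (pos + p.length) := by
  induction p generalizing st pos with
  | nil => simp
  | cons c p' ih =>
    have hc := hp c (by simp)
    simp only [nlB, Bool.or_eq_false_iff, decide_eq_false_iff_not] at hc
    rw [List.cons_append, scanB_cons_other c hc.1 hc.2,
        ih (fun x hx => hp x (by simp [hx]))]
    simp only [List.foldl_cons, List.length_cons]
    congr 1
    omega

theorem splitKeep_flatten (cs acc : List Char) :
    joinL (splitKeep cs acc) = acc.reverse ++ cs := by
  induction cs, acc using splitKeep.induct with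
  | case1 => simp [splitKeep, joinL]
  | case2 acc h => simp [splitKeep, joinL, h]
  | case3 rest acc ih => simp [splitKeep, joinL] at ih ⊢; simp [ih]
  | case4 rest acc ih => simp [splitKeep, joinL] at ih ⊢; simp [ih]
  | case5 rest acc hne ih =>
    rw [splitKeep_cr rest (fun r he => hne r he) acc]
    simp [joinL] at ih ⊢; simp [ih]
  | case6 c rest acc h1 h2 h3 ih =>
    rw [splitKeep_cons_other c (by simpa using h1) (by simpa using h3), ih]
    simp

-- single-step values of the automaton, per state
theorem dfaStep5 (c : Char) : dfaStep 5 c = 5 := by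
  unfold dfaStep; split_ifs <;> omega
theorem dfaStep4 (c : Char) : dfaStep 4 c = if wsB c then 4 else 5 := by
  unfold dfaStep wsB
  rcases eq_or_ne c '-' with h | h <;> split_ifs <;> simp_all
theorem dfaStep3 (c : Char) : dfaStep 3 c = if wsB c then 4 else 5 := by
  unfold dfaStep wsB
  rcases eq_or_ne c '-' with h | h <;> split_ifs <;> simp_all
theorem dfaStep2 (c : Char) : dfaStep 2 c = if c = '-' then 3 else 5 := by
  unfold dfaStep; split_ifs <;> simp_all
theorem dfaStep1 (c : Char) : dfaStep 1 c = if c = '-' then 2 else 5 := by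
  unfold dfaStep; split_ifs <;> simp_all
theorem dfaStep0 (c : Char) : dfaStep 0 c = if c = '-' then 1 else if wsB c then 0 else 5 := by
  unfold dfaStep wsB
  rcases eq_or_ne c '-' with h | h <;> split_ifs <;> simp_all

-- absorbing / tail states of the automaton
theorem dfa5 (r : List Char) : List.foldl dfaStep 5 r = 5 := by
  induction r with
  | nil => rfl
  | cons c r ih => rw [List.foldl_cons, dfaStep5]; exact ih
theorem dfa4 (r : List Char) : List.foldl dfaStep 4 r = if r.all wsB then 4 else 5 := by
  induction r with
  | nil => simp
  | cons c r ih =>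
    rw [List.foldl_cons, dfaStep4]
    by_cases h : wsB c = true <;> simp [h, ih, dfa5]
theorem dfa3 (r : List Char) :
    List.foldl dfaStep 3 r = if r = [] then 3 else if r.all wsB then 4 else 5 := by
  cases r with
  | nil => simp
  | cons c r =>
    rw [List.foldl_cons, dfaStep3]
    by_cases h : wsB c = true <;> simp [h, dfa4, dfa5]
theorem dfa2 (r : List Char) :
    (List.foldl dfaStep 2 r = 3 ∨ List.foldl dfaStep 2 r = 4) ↔
      ∃ w, r = '-' :: w ∧ w.all wsB := by
  cases r with
  | nil => simp
  | cons c r =>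
    rw [List.foldl_cons, dfaStep2]
    rcases eq_or_ne c '-' with h | h
    · subst h
      rw [if_pos rfl, dfa3]
      by_cases he : r = []
      · simp [he]
      · by_cases ha : r.all wsB = true
        · simp only [if_neg he, if_pos ha]
          simp
          exact fun x hx => List.all_eq_true.mp ha x hx
        · simp only [if_neg he, if_neg ha]
          simp
          simpa using ha
    · rw [if_neg h, dfa5]; simp [h]
theorem dfa1 (r : List Char) :
    (List.foldl dfaStep 1 r = 3 ∨ List.foldl dfaStep 1 r = 4) ↔
      ∃ w, r = '-' :: '-' :: w ∧ w.all wsB := by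
  cases r with
  | nil => simp
  | cons c r =>
    rw [List.foldl_cons, dfaStep1]
    rcases eq_or_ne c '-' with h | h
    · subst h
      rw [if_pos rfl]
      rw [dfa2]
      constructor
      · rintro ⟨w, hw, ha⟩; exact ⟨w, by simp [hw], ha⟩
      · rintro ⟨w, hw, ha⟩; exact ⟨w, by simp_all, ha⟩
    · rw [if_neg h, dfa5]; simp [h]
theorem wsB_dash : wsB '-' = false := by decide
theorem dfa0 (r : List Char) :
    (List.foldl dfaStep 0 r = 3 ∨ List.foldl dfaStep 0 r = 4) ↔
      ∃ w1 w2, r = w1 ++ '-' :: '-' :: '-' :: w2 ∧ w1.all wsB ∧ w2.all wsB := by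
  induction r with
  | nil => simp
  | cons c r ih =>
    rw [List.foldl_cons, dfaStep0]
    rcases eq_or_ne c '-' with h | h
    · subst h
      rw [if_pos rfl, dfa1]
      constructor
      · rintro ⟨w, hw, ha⟩
        exact ⟨[], w, by simp [hw], by simp, ha⟩
      · rintro ⟨w1, w2, hw, h1, h2⟩
        cases w1 with
        | nil => exact ⟨w2, by simpa using hw, h2⟩
        | cons d w1' =>
          exfalso
          rw [List.cons_append] at hw
          obtain ⟨hd, -⟩ := List.cons.inj hw
          have : wsB d = true := by simp at h1; exact h1.1
          rw [← hd, wsB_dash] at this; exact absurd this (by simp)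
    · by_cases hw : wsB c = true
      · rw [if_neg h, if_pos hw, ih]
        constructor
        · rintro ⟨w1, w2, hr, h1, h2⟩
          exact ⟨c :: w1, w2, by simp [hr], by simp [hw, h1], h2⟩
        · rintro ⟨w1, w2, hr, h1, h2⟩
          cases w1 with
          | nil => exact absurd (List.cons.inj hr).1 h
          | cons d w1' =>
            rw [List.cons_append] at hr
            obtain ⟨hd, hr'⟩ := List.cons.inj hr
            refine ⟨w1', w2, hr', ?_, h2⟩
            simp at h1 ⊢; exact h1.2
      · rw [if_neg h, if_neg (by simpa using hw), dfa5]
        constructor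
        · intro hc; omega
        · rintro ⟨w1, w2, hr, h1, h2⟩
          cases w1 with
          | nil => exact absurd (List.cons.inj hr).1 h
          | cons d w1' =>
            rw [List.cons_append] at hr
            obtain ⟨hd, -⟩ := List.cons.inj hr
            exfalso
            have : wsB d = true := by simp at h1; exact h1.1
            rw [← hd] at this; exact absurd this (by simp [hw])

theorem char_eq_iff_toNat (c d : Char) : c = d ↔ c.toNat = d.toNat :=
  ⟨fun h => h ▸ rfl, fun h => Char.ext (UInt32.toNat_inj.mp h)⟩

theorem ws_iff (c : Char) (hd : pvDomChar c = true) (hn : nlB c = false) :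
    PySem.Chars.isspace c = wsB c := by
  have e1 : (' ' : Char).toNat = 32 := rfl
  have e2 : ('\t' : Char).toNat = 9 := rfl
  have e3 : ('\x0b' : Char).toNat = 11 := rfl
  have e4 : ('\x0c' : Char).toNat = 12 := rfl
  have e5 : ('\n' : Char).toNat = 10 := rfl
  have e6 : ('\r' : Char).toNat = 13 := rfl
  unfold pvDomChar at hd
  unfold nlB at hn
  simp only [Bool.or_eq_true, Bool.and_eq_true, decide_eq_true_eq, beq_iff_eq,
    Bool.or_eq_false_iff, decide_eq_false_iff_not, char_eq_iff_toNat, e5, e6] at hd hn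
  rw [Bool.eq_iff_iff]
  unfold PySem.Chars.isspace wsB
  simp only [Bool.or_eq_true, Bool.and_eq_true, decide_eq_true_eq,
    char_eq_iff_toNat, e1, e2, e3, e4]
  omega

theorem strip_append_ws (x t : List Char) (ht : ∀ c ∈ t, PySem.Chars.isspace c = true) :
    PySem.Chars.strip (x ++ t) = PySem.Chars.strip x := by
  have htnil : List.dropWhile PySem.Chars.isspace t = [] := List.dropWhile_eq_nil_iff.mpr ht
  have htrev : List.dropWhile PySem.Chars.isspace t.reverse = [] :=
    List.dropWhile_eq_nil_iff.mpr (fun c hc => ht c (List.mem_reverse.mp hc))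
  unfold PySem.Chars.strip PySem.Chars.rstrip PySem.Chars.lstrip
  rw [List.dropWhile_append]
  by_cases h : (List.dropWhile PySem.Chars.isspace x).isEmpty
  · rw [if_pos h, htnil]
    rw [List.isEmpty_iff.mp h]
  · rw [if_neg h, List.reverse_append, List.dropWhile_append, if_pos (by simp [htrev])]

theorem strip_eq_ddd_iff (p : List Char) :
    PySem.Chars.strip p = ['-', '-', '-'] ↔
      ∃ w1 w2, p = w1 ++ '-' :: '-' :: '-' :: w2 ∧
        (∀ c ∈ w1, PySem.Chars.isspace c = true) ∧ (∀ c ∈ w2, PySem.Chars.isspace c = true) := by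
  have hdash : PySem.Chars.isspace '-' = false := by decide
  constructor
  · intro h
    refine ⟨List.takeWhile PySem.Chars.isspace p,
      (List.takeWhile PySem.Chars.isspace (List.dropWhile PySem.Chars.isspace p).reverse).reverse,
      ?_, fun c hc => List.mem_takeWhile_imp hc,
      fun c hc => List.mem_takeWhile_imp (List.mem_reverse.mp hc)⟩
    have h2 : PySem.Chars.strip p =
        (List.dropWhile PySem.Chars.isspace (List.dropWhile PySem.Chars.isspace p).reverse).reverse := rfl
    conv_lhs => rw [← List.takeWhile_append_dropWhile
      (p := PySem.Chars.isspace) (l := p)]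
    congr 1
    have key : List.dropWhile PySem.Chars.isspace p =
        (List.dropWhile PySem.Chars.isspace (List.dropWhile PySem.Chars.isspace p).reverse).reverse
          ++ (List.takeWhile PySem.Chars.isspace (List.dropWhile PySem.Chars.isspace p).reverse).reverse := by
      calc List.dropWhile PySem.Chars.isspace p
          = (List.dropWhile PySem.Chars.isspace p).reverse.reverse := (List.reverse_reverse _).symm
        _ = (List.takeWhile PySem.Chars.isspace (List.dropWhile PySem.Chars.isspace p).reverse
              ++ List.dropWhile PySem.Chars.isspace (List.dropWhile PySem.Chars.isspace p).reverse).reverse := by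
            rw [List.takeWhile_append_dropWhile]
        _ = _ := List.reverse_append
    conv_lhs => rw [key, h2.symm.trans h]
    rfl
  · rintro ⟨w1, w2, hp2, h1, h2⟩
    subst hp2
    rw [show w1 ++ '-' :: '-' :: '-' :: w2 = (w1 ++ ['-', '-', '-']) ++ w2 by simp,
        strip_append_ws _ _ h2]
    unfold PySem.Chars.strip PySem.Chars.rstrip PySem.Chars.lstrip
    rw [List.dropWhile_append, if_pos (by simp [List.dropWhile_eq_nil_iff.mpr h1])]
    decide

-- a separator line is exactly a line the automaton accepts
theorem sep_iff (p term : List Char) (hp : ∀ c ∈ p, pvDomChar c = true ∧ nlB c = false)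
    (ht : term.all PySem.Chars.isspace = true) :
    PySem.Str.strip (String.ofList (p ++ term)) = "---" ↔
      (List.foldl dfaStep 0 p = 3 ∨ List.foldl dfaStep 0 p = 4) := by
  rw [dfa0]
  unfold PySem.Str.strip
  rw [String.toList_ofList]
  have hofl : ∀ l : List Char, (String.ofList l = "---") ↔ l = ['-', '-', '-'] := by
    intro l
    constructor
    · intro h; rw [← String.toList_ofList (l := l), h]; decide
    · intro h; rw [h]
  rw [hofl, strip_append_ws _ _ (List.all_eq_true.mp ht), strip_eq_ddd_iff]
  constructor
  · rintro ⟨w1, w2, hr, h1, h2⟩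
    refine ⟨w1, w2, hr, ?_, ?_⟩
    · rw [List.all_eq_true]
      intro c hc
      have hcp : c ∈ p := by rw [hr]; simp [hc]
      rw [← ws_iff c (hp c hcp).1 (hp c hcp).2]; exact h1 c hc
    · rw [List.all_eq_true]
      intro c hc
      have hcp : c ∈ p := by rw [hr]; simp [hc]
      rw [← ws_iff c (hp c hcp).1 (hp c hcp).2]; exact h2 c hc
  · rintro ⟨w1, w2, hr, h1, h2⟩
    refine ⟨w1, w2, hr, ?_, ?_⟩
    · intro c hc
      have hcp : c ∈ p := by rw [hr]; simp [hc]
      rw [ws_iff c (hp c hcp).1 (hp c hcp).2]; exact List.all_eq_true.mp h1 c hc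
    · intro c hc
      have hcp : c ∈ p := by rw [hr]; simp [hc]
      rw [ws_iff c (hp c hcp).1 (hp c hcp).2]; exact List.all_eq_true.mp h2 c hc

theorem dropWhile_head_false (q : Char → Bool) (cs t : _) (r : List Char)
    (h : List.dropWhile q cs = t :: r) : q t = false := by
  have := List.head_dropWhile_not q (l := cs) (by simp [h])
  simpa [h] using this

-- the relation the induction maintains
def BSpec (cs : List Char) (seps pos : Nat) : Prop :=
  match (if seps = 0 then (afterSep (splitKeep cs [])).bind afterSep
         else afterSep (splitKeep cs [])) with
  | some rest => ∃ k, scanB cs 0 seps pos = some (pos + k) ∧ cs.drop k = joinL rest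
  | none => scanB cs 0 seps pos = none

-- one full line step, shared by the three line-terminator shapes
set_option maxHeartbeats 1000000 in
theorem scan_core (n : Nat)
    (ih : ∀ cs : List Char, cs.length ≤ n → ∀ seps pos : Nat, (seps = 0 ∨ seps = 1) →
      (∀ c ∈ cs, pvDomChar c = true) → BSpec cs seps pos)
    (p term rest : List Char)
    (hpnl : ∀ c ∈ p, nlB c = false) (hpdom : ∀ c ∈ p, pvDomChar c = true)
    (hrdom : ∀ c ∈ rest, pvDomChar c = true)
    (hta : term.all PySem.Chars.isspace = true)
    (hrlen : rest.length ≤ n)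
    (hsk : splitKeep (p ++ (term ++ rest)) [] = String.ofList (p ++ term) :: splitKeep rest [])
    (hsc : ∀ seps pos : Nat, scanB (p ++ (term ++ rest)) 0 seps pos =
        (if (if List.foldl dfaStep 0 p = 3 ∨ List.foldl dfaStep 0 p = 4 then seps + 1 else seps) = 2
         then some (pos + p.length + term.length)
         else scanB rest 0
           (if List.foldl dfaStep 0 p = 3 ∨ List.foldl dfaStep 0 p = 4 then seps + 1 else seps)
           (pos + p.length + term.length)))
    (seps pos : Nat) (hseps : seps = 0 ∨ seps = 1) :
    BSpec (p ++ (term ++ rest)) seps pos := by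
  have hdrop : ∀ k : Nat, (p ++ (term ++ rest)).drop (p.length + term.length + k) = rest.drop k := by
    intro k
    rw [show p ++ (term ++ rest) = (p ++ term) ++ rest by simp,
        show p.length + term.length + k = (p ++ term).length + k by simp]
    exact List.drop_length_add_append k
  have hsi := sep_iff p term (fun c hc => ⟨hpdom c hc, hpnl c hc⟩) hta
  unfold BSpec
  rw [hsk]
  by_cases h34 : List.foldl dfaStep 0 p = 3 ∨ List.foldl dfaStep 0 p = 4
  · have hline : PySem.Str.strip (String.ofList (p ++ term)) = "---" := hsi.mpr h34
    have hAS : afterSep (String.ofList (p ++ term) :: splitKeep rest []) =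
        some (splitKeep rest []) := by
      rw [show afterSep (String.ofList (p ++ term) :: splitKeep rest []) =
        if PySem.Str.strip (String.ofList (p ++ term)) = "---" then some (splitKeep rest [])
        else afterSep (splitKeep rest []) from rfl, if_pos hline]
    rcases hseps with h0 | h1
    · subst h0
      rw [if_pos rfl, hAS, Option.bind_some]
      have hih := ih rest hrlen 1 (pos + p.length + term.length) (Or.inr rfl) hrdom
      unfold BSpec at hih
      rw [if_neg (by omega : ¬ (1 : Nat) = 0)] at hih
      revert hih
      rcases hA : afterSep (splitKeep rest []) with _ | rest2 <;> intro hih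
      · show scanB (p ++ (term ++ rest)) 0 0 pos = none
        rw [hsc 0 pos, if_pos h34, if_neg (by omega : ¬ (0 + 1 : Nat) = 2)]
        exact hih
      · obtain ⟨k', hks, hdr⟩ := hih
        show ∃ k, scanB (p ++ (term ++ rest)) 0 0 pos = some (pos + k) ∧
          (p ++ (term ++ rest)).drop k = joinL rest2
        refine ⟨p.length + term.length + k', ?_, ?_⟩
        · rw [hsc 0 pos, if_pos h34, if_neg (by omega : ¬ (0 + 1 : Nat) = 2), hks]
          congr 1
          omega
        · rw [hdrop k']; exact hdr
    · subst h1
      rw [if_neg (by omega : ¬ (1 : Nat) = 0), hAS]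
      show ∃ k, scanB (p ++ (term ++ rest)) 0 1 pos = some (pos + k) ∧
        (p ++ (term ++ rest)).drop k = joinL (splitKeep rest [])
      refine ⟨p.length + term.length, ?_, ?_⟩
      · rw [hsc 1 pos, if_pos h34, if_pos rfl]
        congr 1
        omega
      · have h0d := hdrop 0
        simp only [Nat.add_zero, List.drop_zero] at h0d
        rw [h0d, splitKeep_flatten rest []]
        simp
  · have hline : ¬ PySem.Str.strip (String.ofList (p ++ term)) = "---" :=
      fun h => h34 (hsi.mp h)
    have hAS : afterSep (String.ofList (p ++ term) :: splitKeep rest []) =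
        afterSep (splitKeep rest []) := by
      rw [show afterSep (String.ofList (p ++ term) :: splitKeep rest []) =
        if PySem.Str.strip (String.ofList (p ++ term)) = "---" then some (splitKeep rest [])
        else afterSep (splitKeep rest []) from rfl, if_neg hline]
    rw [hAS]
    have hih := ih rest hrlen seps (pos + p.length + term.length) hseps hrdom
    unfold BSpec at hih
    have hs2 : ¬ (if List.foldl dfaStep 0 p = 3 ∨ List.foldl dfaStep 0 p = 4
        then seps + 1 else seps) = 2 := by
      rw [if_neg h34]; omega
    revert hih
    rcases hA : (if seps = 0 then (afterSep (splitKeep rest [])).bind afterSep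
                 else afterSep (splitKeep rest [])) with _ | rest2 <;> intro hih
    · show scanB (p ++ (term ++ rest)) 0 seps pos = none
      rw [hsc seps pos, if_neg hs2, if_neg h34]
      exact hih
    · obtain ⟨k', hks, hdr⟩ := hih
      show ∃ k, scanB (p ++ (term ++ rest)) 0 seps pos = some (pos + k) ∧
        (p ++ (term ++ rest)).drop k = joinL rest2
      refine ⟨p.length + term.length + k', ?_, ?_⟩
      · rw [hsc seps pos, if_neg hs2, if_neg h34, hks]
        congr 1
        omega
      · rw [hdrop k']; exact hdr

-- a line with no terminator at the end of the text
theorem scan_last (p : List Char) (hpne : p ≠ [])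
    (hpnl : ∀ c ∈ p, nlB c = false) (hpdom : ∀ c ∈ p, pvDomChar c = true)
    (seps pos : Nat) (hseps : seps = 0 ∨ seps = 1) :
    BSpec p seps pos := by
  have hsk : splitKeep p [] = [String.ofList p] := by
    have h := splitKeep_pre p hpnl [] []
    simp only [List.append_nil] at h
    rw [h, splitKeep]
    rw [if_neg (by simpa using hpne)]
    simp
  have hsc : scanB p 0 seps pos = scanB [] (List.foldl dfaStep 0 p) seps (pos + p.length) := by
    have h := scanB_pre p hpnl [] 0 seps pos
    simpa using h
  have hsi := sep_iff p [] (fun c hc => ⟨hpdom c hc, hpnl c hc⟩) (by simp)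
  simp only [List.append_nil] at hsi
  unfold BSpec
  rw [hsk]
  by_cases h34 : List.foldl dfaStep 0 p = 3 ∨ List.foldl dfaStep 0 p = 4
  · have hline : PySem.Str.strip (String.ofList p) = "---" := hsi.mpr h34
    have hAS : afterSep [String.ofList p] = some [] := by
      rw [show afterSep [String.ofList p] =
        if PySem.Str.strip (String.ofList p) = "---" then some [] else afterSep [] from rfl,
        if_pos hline]
    rcases hseps with h0 | h1
    · subst h0
      rw [if_pos rfl, hAS, Option.bind_some]
      show scanB p 0 0 pos = none
      rw [hsc, scanB]
      simp
    · subst h1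
      rw [if_neg (by omega : ¬ (1 : Nat) = 0), hAS]
      show ∃ k, scanB p 0 1 pos = some (pos + k) ∧ p.drop k = joinL []
      refine ⟨p.length, ?_, ?_⟩
      · rw [hsc, scanB, if_pos ⟨h34, rfl⟩]
      · simp [joinL]
  · have hline : ¬ PySem.Str.strip (String.ofList p) = "---" := fun h => h34 (hsi.mp h)
    have hAS : afterSep [String.ofList p] = none := by
      rw [show afterSep [String.ofList p] =
        if PySem.Str.strip (String.ofList p) = "---" then some [] else afterSep [] from rfl,
        if_neg hline]
      rfl
    have hnone : (if seps = 0 then (afterSep [String.ofList p]).bind afterSep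
        else afterSep [String.ofList p]) = none := by
      rw [hAS]; rcases hseps with h | h <;> simp [h]
    rw [hnone]
    show scanB p 0 seps pos = none
    rw [hsc, scanB]
    simp [h34]

theorem bspec_nil (seps pos : Nat) : BSpec [] seps pos := by
  unfold BSpec
  have h1 : splitKeep [] [] = [] := by simp [splitKeep]
  have h2 : afterSep [] = none := rfl
  rw [h1, h2]
  rcases Nat.eq_zero_or_pos seps with h | h <;>
    · by_cases hs : seps = 0 <;> simp [hs, scanB]

-- main bridge: the char scan computes exactly "afterSep twice" on the line list
theorem scan_main (n : Nat) : ∀ (cs : List Char), cs.length ≤ n →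
    ∀ (seps pos : Nat), (seps = 0 ∨ seps = 1) → (∀ c ∈ cs, pvDomChar c = true) →
    BSpec cs seps pos := by
  induction n with
  | zero =>
    intro cs hlen seps pos hseps hdom
    have : cs = [] := List.length_eq_zero_iff.mp (Nat.le_zero.mp hlen)
    subst this
    exact bspec_nil seps pos
  | succ n ihn =>
    intro cs hlen seps pos hseps hdom
    rcases eq_or_ne cs [] with hnil | hne
    · subst hnil; exact bspec_nil seps pos
    · have hcs : cs = cs.takeWhile (fun c => !nlB c) ++ cs.dropWhile (fun c => !nlB c) :=
        (List.takeWhile_append_dropWhile).symm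
      have hpnl : ∀ c ∈ cs.takeWhile (fun c => !nlB c), nlB c = false := by
        intro c hc
        have := List.mem_takeWhile_imp hc
        simpa using this
      have hpdom : ∀ c ∈ cs.takeWhile (fun c => !nlB c), pvDomChar c = true := fun c hc =>
        hdom c (by rw [hcs]; exact List.mem_append_left _ hc)
      rcases hrem : cs.dropWhile (fun c => !nlB c) with _ | ⟨t, r0⟩
      · rw [hrem, List.append_nil] at hcs
        have hpne : cs.takeWhile (fun c => !nlB c) ≠ [] := fun h => hne (by rw [hcs, h])
        rw [hcs]
        exact scan_last _ hpne hpnl hpdom seps pos hseps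
      · rw [hrem] at hcs
        have hnlt : nlB t = true := by
          have := dropWhile_head_false (fun c => !nlB c) cs t r0 hrem
          simpa using this
        have hrdom0 : ∀ c ∈ r0, pvDomChar c = true := fun c hc =>
          hdom c (by rw [hcs]; simp [hc])
        have hlen' : (cs.takeWhile (fun c => !nlB c)).length + 1 + r0.length = cs.length := by
          conv_rhs => rw [hcs]
          simp
          omega
        rcases (by simpa [nlB] using hnlt : t = '\n' ∨ t = '\r') with ht | ht
        · -- term = ['\n']
          subst ht
          rw [hcs, show ('\n' :: r0 : List Char) = ['\n'] ++ r0 from rfl]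
          refine scan_core n ihn _ ['\n'] r0 hpnl hpdom hrdom0 (by decide)
            (by omega) ?_ ?_ seps pos hseps
          · rw [splitKeep_pre _ hpnl _ []]
            simp [splitKeep]
          · intro seps' pos'
            rw [scanB_pre _ hpnl _ 0 seps' pos']
            rw [show (['\n'] ++ r0 : List Char) = '\n' :: r0 from rfl, scanB]
            simp
        · subst ht
          rcases hr0 : r0 with _ | ⟨u, r1⟩
          · -- term = ['\r'], rest = []
            subst hr0
            rw [hcs, show ('\r' :: [] : List Char) = ['\r'] ++ [] from rfl]
            refine scan_core n ihn _ ['\r'] [] hpnl hpdom (by simp) (by decide)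
              (by omega) ?_ ?_ seps pos hseps
            · rw [splitKeep_pre _ hpnl _ []]
              simp [splitKeep]
            · intro seps' pos'
              rw [scanB_pre _ hpnl _ 0 seps' pos']
              rw [show (['\r'] ++ [] : List Char) = '\r' :: [] from rfl,
                  scanB_cr [] (by simp)]
              simp
          · rcases eq_or_ne u '\n' with hu | hu
            · -- term = ['\r','\n'], rest = r1
              subst hu
              subst hr0
              rw [hcs,
                  show ('\r' :: '\n' :: r1 : List Char) = ['\r', '\n'] ++ r1 from rfl]
              have hr1dom : ∀ c ∈ r1, pvDomChar c = true := fun c hc =>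
                hrdom0 c (by simp [hc])
              refine scan_core n ihn _ ['\r', '\n'] r1 hpnl hpdom hr1dom (by decide)
                (by simp only [List.length_cons] at hlen' ⊢; omega) ?_ ?_ seps pos hseps
              · rw [splitKeep_pre _ hpnl _ []]
                simp [splitKeep]
              · intro seps' pos'
                rw [scanB_pre _ hpnl _ 0 seps' pos']
                rw [show (['\r', '\n'] ++ r1 : List Char) = '\r' :: '\n' :: r1 from rfl, scanB]
                simp [Nat.add_assoc]
            · -- term = ['\r'], rest = u :: r1 (u ≠ '\n')
              subst hr0
              rw [hcs, show ('\r' :: u :: r1 : List Char) = ['\r'] ++ (u :: r1) from rfl]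
              have hurdom : ∀ c ∈ u :: r1, pvDomChar c = true := fun c hc => hrdom0 c hc
              refine scan_core n ihn _ ['\r'] (u :: r1) hpnl hpdom hurdom (by decide)
                (by simp only [List.length_cons] at hlen' ⊢; omega) ?_ ?_ seps pos hseps
              · rw [splitKeep_pre _ hpnl _ []]
                rw [show (['\r'] ++ (u :: r1) : List Char) = '\r' :: u :: r1 from rfl]
                rw [splitKeep_cr (u :: r1) (fun r he => hu (List.cons.inj he).1)]
                simp
              · intro seps' pos'
                rw [scanB_pre _ hpnl _ 0 seps' pos']
                rw [show (['\r'] ++ (u :: r1) : List Char) = '\r' :: u :: r1 from rfl,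
                    scanB_cr (u :: r1) (fun r he => hu (List.cons.inj he).1)]
                simp


-- "".join of a list of strings flattens their characters
theorem join_eq_joinL (ls : List String) :
    PySem.Str.join "" ls = String.ofList (joinL ls) := by
  unfold PySem.Str.join PySem.Chars.join joinL
  congr 1
  rw [show ("" : String).toList = [] from rfl]
  generalize ls.map String.toList = xs
  induction xs with
  | nil => rfl
  | cons a xs ih =>
    cases xs with
    | nil => simp [List.intercalate]
    | cons b xs' =>
      simp only [List.intercalate] at ih ⊢
      simp only [List.intersperse] at ih ⊢
      simp_all

-- ===== VERDICT (by name: the statement is the Claim_ definition above) =====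
theorem inject_front_matter_block_spec : Claim_equal_inject_front_matter_block := by
  intro content fm_block hdom
  unfold Spec_inject_front_matter_block inject_front_matter_block inject_front_matter_block_alt
  by_cases hc : content = ""
  · simp [hc]
  · simp only [if_neg hc]
    by_cases hf : has_front_matter content = true
    · simp only [hf, if_true]
      have hdomc : ∀ c ∈ content.toList, pvDomChar c = true := by
        unfold Dom_inject_front_matter_block pvDomStr at hdom
        simp only [Bool.and_eq_true, List.all_eq_true] at hdom
        exact fun c hcm => hdom.1 c hcm
      have hB := scan_main content.toList.length content.toList le_rfl 0 0 (Or.inl rfl) hdomc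
      unfold BSpec at hB
      rw [if_pos rfl] at hB
      rcases h1 : sepIdx (splitKeep content.toList []) with _ | k
      · rw [findSeps_none]
        have hbind : (afterSep (splitKeep content.toList [])).bind afterSep = none := by
          simp [afterSep_eq, h1]
        rw [hbind] at hB
        simp [h1, hB]
      · rcases h2 : sepIdx ((splitKeep content.toList []).drop (k + 1)) with _ | k2
        · rw [findSeps_none]
          have hbind : (afterSep (splitKeep content.toList [])).bind afterSep = none := by
            simp [afterSep_eq, h1, h2]
          rw [hbind] at hB
          simp [h1, h2, hB]
        · rw [findSeps_none]
          simp only [h1, h2, Option.map_some]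
          have hbind : (afterSep (splitKeep content.toList [])).bind afterSep =
              some (((splitKeep content.toList []).drop (k + 1)).drop (k2 + 1)) := by
            simp [afterSep_eq, h1, h2]
          rw [hbind] at hB
          obtain ⟨off, hoff, hdr⟩ := hB
          simp only [Nat.zero_add] at hoff
          rw [hoff]
          have hd2 : ((splitKeep content.toList []).drop (k + 1)).drop (k2 + 1)
              = (splitKeep content.toList []).drop (0 + k + 1 + k2 + 1) := by
            rw [List.drop_drop]; congr 1; omega
          rw [join_eq_joinL, ← hd2, ← hdr]
    · simp [hf]
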